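-- pv_equiv track=rewrite | github.com/tsangsiu/ls-py110-119 | pedac/sort_by_consonant_count.py | sort_by_consonant_count
-- ===== SOURCE A (Python) =====
-- def count_max_adj_consonants(s):
--     s = s.replace(' ', '')
--
--     max_adj_consonants = 0
--     streak = 0
--
--     for idx, char in enumerate(s):
--         if char not in ['a', 'e', 'i', 'o', 'u']:
--             streak += 1
--         else:
--             if streak > max_adj_consonants:
--                 max_adj_consonants = streak
--             streak = 0
--
--         if idx == len(s) - 1 and streak > max_adj_consonants:
--             max_adj_consonants = streak
--
--     if max_adj_consonants == 1:
--         return 0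
--     else:
--         return max_adj_consonants
--
-- def sort_by_consonant_count(lst):
--     output_lst = []
--     lst_by_most_adj_consonants = {}
--
--     for s in lst:
--         max_adj_consonants = count_max_adj_consonants(s)
--         if max_adj_consonants in lst_by_most_adj_consonants:
--             lst_by_most_adj_consonants[max_adj_consonants].append(s)
--         else:
--             lst_by_most_adj_consonants[max_adj_consonants] = [s]
--
--     counts_in_descending = list(lst_by_most_adj_consonants.keys())
--     counts_in_descending.sort(reverse=True)
--
--     for count in counts_in_descending:
--         output_lst.extend(lst_by_most_adj_consonants[count])
--
--     return output_lst
-- ===== SOURCE B (Python) =====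
-- def count_max_adj_consonants(s):
--     best = streak = 0
--     for ch in s:
--         if ch == ' ':
--             continue
--         if ch in 'aeiou':
--             best = max(best, streak)
--             streak = 0
--         else:
--             streak += 1
--     best = max(best, streak)
--     return 0 if best == 1 else best
--
-- def sort_by_consonant_count(lst):
--     return sorted(lst, key=count_max_adj_consonants, reverse=True)
-- ===== Notes on version B (the rewrite author's own statement) =====
-- stated objective: idiomatic
-- what changed: B rewrites the key helper as a single skip-spaces/max-at-end scan (no replace pass, no enumerate, no last-index special case) and replaces A's bucket dict + key-sort + re-emission loops with one stable sorted(lst, key=..., reverse=True).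
import Mathlib
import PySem

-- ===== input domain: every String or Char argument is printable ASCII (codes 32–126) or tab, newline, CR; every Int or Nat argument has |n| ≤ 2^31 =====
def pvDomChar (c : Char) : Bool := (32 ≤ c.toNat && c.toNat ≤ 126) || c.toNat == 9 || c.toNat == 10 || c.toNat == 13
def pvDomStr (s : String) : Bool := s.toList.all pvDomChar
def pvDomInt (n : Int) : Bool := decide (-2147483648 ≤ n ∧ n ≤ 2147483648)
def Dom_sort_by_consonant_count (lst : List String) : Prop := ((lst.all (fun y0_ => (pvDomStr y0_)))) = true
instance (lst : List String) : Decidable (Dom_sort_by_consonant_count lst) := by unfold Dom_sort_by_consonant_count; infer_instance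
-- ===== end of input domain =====

-- B rewrites the key helper as one skip-spaces/max-at-end scan and replaces A's bucket dict + key-sort + re-emission with a single stable reverse key-sort; same return value.

-- ===== PORT A =====
-- A's helper: longest run of adjacent non-vowels (spaces removed first); a run of length 1 counts as 0
def count_max_adj_consonants (s : String) : Int :=
  let s := PySem.Str.replace s " " ""
  let r := (PySem.List.enumerate s.toList).foldl
    (fun (acc : Int × Int) (p : Int × Char) =>
      let m := acc.1
      let st := acc.2
      let (m, st) :=
        if ¬ (p.2 ∈ ['a', 'e', 'i', 'o', 'u']) then (m, st + 1)
        else (if st > m then st else m, 0)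
      let m := if p.1 == PySem.Str.len s - 1 && decide (st > m) then st else m
      (m, st))
    (0, 0)
  if r.1 == 1 then 0 else r.1

def sort_by_consonant_count (lst : List String) : List String :=
  let output_lst : List String := []
  let d := lst.foldl
    (fun d s =>
      let m := count_max_adj_consonants s
      if d.contains m then d.modify m [] (fun v => v ++ [s])   -- d[m].append(s)
      else d.insert m [s])
    (PySem.Dict.empty : PySem.Dict Int (List String))
  let counts_in_descending := PySem.List.sorted d.keys (fun x => x) true
  -- getD with [] is exact: every count iterated over is a key of d, so Python's d[count] never raises
  counts_in_descending.foldl (fun out c => out ++ d.getD c []) output_lst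

-- ===== PORT B =====
-- B's helper: one pass over the raw string, skipping spaces, folding max at the end
def count_max_adj_consonants_b (s : String) : Int :=
  let r := s.toList.foldl
    (fun (acc : Int × Int) ch =>
      if ch == ' ' then acc
      else if ch ∈ ['a', 'e', 'i', 'o', 'u'] then (max acc.1 acc.2, 0)
      else (acc.1, acc.2 + 1))
    (0, 0)
  let best := max r.1 r.2
  if best == 1 then 0 else best

def sort_by_consonant_count_alt (lst : List String) : List String :=
  PySem.List.sorted lst count_max_adj_consonants_b true

-- ===== PRECONDITION & SPEC =====
def Spec_sort_by_consonant_count (lst : List String) (out : List String) : Prop := out = sort_by_consonant_count_alt lst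
instance (lst : List String) (out : List String) : Decidable (Spec_sort_by_consonant_count lst out) := by unfold Spec_sort_by_consonant_count; infer_instance

-- ===== CLAIM (what is proved, stated in full; the proofs are below) =====
def Claim_equal_sort_by_consonant_count : Prop := ∀ (lst : List String), Dom_sort_by_consonant_count lst → Spec_sort_by_consonant_count lst (sort_by_consonant_count lst)

-- ===== LEMMAS AND PROOFS =====

-- replace s " " "" deletes the spaces
theorem pv_replace_go_filter : ∀ (fuel : Nat) (l acc : List Char), l.length ≤ fuel →
    PySem.Chars.replace.go [' '] [] fuel l acc
      = acc.reverse ++ l.filter (fun c => c ≠ ' ') := by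
  intro fuel
  induction fuel with
  | zero =>
    intro l acc h
    have : l = [] := List.eq_nil_of_length_eq_zero (Nat.le_zero.1 h)
    subst this
    simp [PySem.Chars.replace.go]
  | succ n ih =>
    intro l acc h
    cases l with
    | nil => simp [PySem.Chars.replace.go]
    | cons c t =>
      by_cases hc : c = ' '
      · subst hc
        rw [show PySem.Chars.replace.go [' '] [] (n+1) (' ' :: t) acc
            = PySem.Chars.replace.go [' '] [] n t acc from by
          simp [PySem.Chars.replace.go, List.isPrefixOf]]
        rw [ih t acc (by simpa using Nat.le_of_succ_le_succ h)]
        simp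
      · rw [show PySem.Chars.replace.go [' '] [] (n+1) (c :: t) acc
            = PySem.Chars.replace.go [' '] [] n t (c :: acc) from by
          have hc' : ¬ (' ' = c) := fun hq => hc hq.symm
          simp [PySem.Chars.replace.go, List.isPrefixOf, hc']]
        rw [ih t (c :: acc) (by simpa using Nat.le_of_succ_le_succ h)]
        simp [hc]

theorem pv_replace_filter (s : String) :
    (PySem.Str.replace s " " "").toList = s.toList.filter (fun c => c ≠ ' ') := by
  have h := pv_replace_go_filter s.toList.length s.toList [] (le_refl _)
  simp only [PySem.Str.replace, PySem.Chars.replace, String.toList_ofList] at *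
  simpa [PySem.Chars.replace] using h

-- A's enumerated loop with the last-index check, reduced to a plain fold plus a final max
theorem pv_enumfold (n : Int) : ∀ (l : List Char) (i m st : Int), i + l.length = n →
    (PySem.List.enumerate l i).foldl
      (fun (acc : Int × Int) (p : Int × Char) =>
        let m := acc.1
        let st := acc.2
        let (m, st) :=
          if ¬ (p.2 ∈ ['a', 'e', 'i', 'o', 'u']) then (m, st + 1)
          else (if st > m then st else m, 0)
        let m := if p.1 == n - 1 && decide (st > m) then st else m
        (m, st))
      (m, st)
    = (if l.isEmpty then (m, st)
       else
         let P := l.foldl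
           (fun (acc : Int × Int) (c : Char) =>
             if ¬ (c ∈ ['a', 'e', 'i', 'o', 'u']) then (acc.1, acc.2 + 1)
             else (if acc.2 > acc.1 then acc.2 else acc.1, 0))
           (m, st)
         (max P.1 P.2, P.2)) := by
  intro l
  induction l with
  | nil => intro i m st h; simp [PySem.List.enumerate_nil]
  | cons c cs ih =>
    intro i m st h
    rw [PySem.List.enumerate_cons, List.foldl_cons]
    cases cs with
    | nil =>
      have hi : (i == n - 1) = true := by
        simp only [List.length_cons, List.length_nil] at h
        simp only [beq_iff_eq]
        push_cast at h
        omega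
      by_cases hv : c ∈ ['a', 'e', 'i', 'o', 'u'] <;>
        simp only [hv, not_true_eq_false, not_false_eq_true, if_true, if_false,
          PySem.List.enumerate_nil, List.foldl_nil, List.foldl_cons, List.isEmpty_cons,
          hi, Bool.true_and, decide_eq_true_eq, Prod.mk.injEq, Bool.false_eq_true] <;>
        refine ⟨?_, trivial⟩ <;> split_ifs <;> omega
    | cons c2 cs2 =>
      have hi : (i == n - 1) = false := by
        simp only [List.length_cons] at h
        simp only [beq_eq_false_iff_ne, ne_eq]
        push_cast at h
        omega
      have h' : (i + 1) + (((c2 :: cs2).length : Nat) : Int) = n := by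
        simp only [List.length_cons] at h ⊢
        push_cast at h ⊢
        omega
      by_cases hv : c ∈ ['a', 'e', 'i', 'o', 'u']
      · simp only [hv, not_true_eq_false, if_false, hi,
          Bool.false_and, Bool.false_eq_true, List.isEmpty_cons, List.foldl_cons]
        rw [ih (i + 1) _ _ h']
        simp
      · simp only [hv, not_false_eq_true, if_true, hi,
          Bool.false_and, Bool.false_eq_true, List.isEmpty_cons, List.foldl_cons]
        rw [ih (i + 1) _ _ h']
        simp

-- B's fold over the raw string equals A's inner fold over the space-free string
theorem pv_bfold : ∀ (l : List Char) (m st : Int),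
    l.foldl
      (fun (acc : Int × Int) ch =>
        if ch == ' ' then acc
        else if ch ∈ ['a', 'e', 'i', 'o', 'u'] then (max acc.1 acc.2, 0)
        else (acc.1, acc.2 + 1))
      (m, st)
    = (l.filter (fun c => c ≠ ' ')).foldl
        (fun (acc : Int × Int) (c : Char) =>
          if ¬ (c ∈ ['a', 'e', 'i', 'o', 'u']) then (acc.1, acc.2 + 1)
          else (if acc.2 > acc.1 then acc.2 else acc.1, 0))
        (m, st) := by
  intro l
  induction l with
  | nil => intro m st; rfl
  | cons c cs ih =>
    intro m st
    by_cases hsp : c = ' '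
    · subst hsp
      have h2 := ih m st
      simp only [List.foldl_cons, List.filter_cons] at h2 ⊢
      simp at h2 ⊢
      exact h2
    · by_cases hv : c ∈ ['a', 'e', 'i', 'o', 'u']
      · have hvd : c = 'a' ∨ c = 'e' ∨ c = 'i' ∨ c = 'o' ∨ c = 'u' := by simpa using hv
        have hnd : ¬ (¬c = 'a' ∧ ¬c = 'e' ∧ ¬c = 'i' ∧ ¬c = 'o' ∧ ¬c = 'u') := by tauto
        have h2 := ih (max m st) 0
        simp only [List.foldl_cons, List.filter_cons] at h2 ⊢
        simp [hsp] at h2 ⊢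
        rw [if_pos hvd, if_neg hnd]
        convert h2 using 3
        rw [max_def]
        split_ifs <;> omega
      · have hnd : ¬ (c = 'a' ∨ c = 'e' ∨ c = 'i' ∨ c = 'o' ∨ c = 'u') := by simpa using hv
        have hv' : ¬c = 'a' ∧ ¬c = 'e' ∧ ¬c = 'i' ∧ ¬c = 'o' ∧ ¬c = 'u' := by tauto
        have h2 := ih m (st + 1)
        simp only [List.foldl_cons, List.filter_cons] at h2 ⊢
        simp [hsp] at h2 ⊢
        rw [if_neg hnd, if_pos hv']
        exact h2

-- the two key functions agree
theorem pv_key_eq (s : String) :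
    count_max_adj_consonants_b s = count_max_adj_consonants s := by
  unfold count_max_adj_consonants count_max_adj_consonants_b
  simp only [PySem.Str.len_eq, pv_replace_filter]
  rw [pv_bfold s.toList 0 0]
  set l := s.toList.filter (fun c => c ≠ ' ') with hl
  have h0 : (0:Int) + (l.length : Int) = (l.length : Int) := by omega
  rw [pv_enumfold (l.length : Int) l 0 0 0 h0]
  by_cases he : l.isEmpty
  · have : l = [] := List.isEmpty_iff.1 he
    simp [this]
  · simp only [he]
    simp

theorem pv_insertBy_pairwise (key : String → Int) (x : String) (l : List String)
    (h : l.Pairwise (fun a b => key b ≤ key a)) :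
    (PySem.List.insertBy (fun a b => decide (key b < key a)) x l).Pairwise
      (fun a b => key b ≤ key a) := by
  induction l with
  | nil => simp [PySem.List.insertBy]
  | cons y ys ih =>
    rw [List.pairwise_cons] at h
    by_cases hb : key y < key x
    · rw [show PySem.List.insertBy (fun a b => decide (key b < key a)) x (y :: ys)
          = x :: y :: ys from by simp [PySem.List.insertBy, hb]]
      refine List.pairwise_cons.2 ⟨?_, List.pairwise_cons.2 ⟨h.1, h.2⟩⟩
      intro z hz
      rcases List.mem_cons.1 hz with hz | hz
      · subst hz; exact le_of_lt hb
      · exact le_trans (h.1 z hz) (le_of_lt hb)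
    · rw [show PySem.List.insertBy (fun a b => decide (key b < key a)) x (y :: ys)
          = y :: PySem.List.insertBy (fun a b => decide (key b < key a)) x ys from by
        simp [PySem.List.insertBy, hb]]
      refine List.pairwise_cons.2 ⟨?_, ih h.2⟩
      intro z hz
      rcases (PySem.List.mem_insertBy _ _ _ _).1 hz with hz | hz
      · subst hz; exact le_of_not_gt hb
      · exact h.1 z hz

theorem pv_insertBy_filter (key : String → Int) (k : Int) (x : String) (l : List String)
    (h : l.Pairwise (fun a b => key b ≤ key a)) :
    (PySem.List.insertBy (fun a b => decide (key b < key a)) x l).filter (fun a => key a == k)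
      = l.filter (fun a => key a == k) ++ (if key x == k then [x] else []) := by
  induction l with
  | nil =>
    by_cases hx : (key x == k) = true <;>
      simp [PySem.List.insertBy, hx]
  | cons y ys ih =>
    rw [List.pairwise_cons] at h
    by_cases hb : key y < key x
    · rw [show PySem.List.insertBy (fun a b => decide (key b < key a)) x (y :: ys)
          = x :: y :: ys from by simp [PySem.List.insertBy, hb]]
      by_cases hx : (key x == k) = true
      · have hxk : key x = k := by exact_mod_cast eq_of_beq hx
        have hy : ¬ (key y == k) = true := by simp only [beq_iff_eq]; omega
        have hys : ∀ z ∈ ys, ¬ (key z == k) = true := by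
          intro z hz
          have := h.1 z hz
          simp only [beq_iff_eq]; omega
        simp [hx, hy, List.filter_eq_nil_iff.2 hys]
      · rw [List.filter_cons, if_neg hx]
        simp [hx]
    · rw [show PySem.List.insertBy (fun a b => decide (key b < key a)) x (y :: ys)
          = y :: PySem.List.insertBy (fun a b => decide (key b < key a)) x ys from by
        simp [PySem.List.insertBy, hb]]
      rw [List.filter_cons, List.filter_cons, ih h.2]
      by_cases hy : (key y == k) = true <;> simp [hy]

theorem pv_eq_of_filters (key : String → Int) :
    ∀ ys zs : List String, ys.Pairwise (fun a b => key b ≤ key a) →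
      zs.Pairwise (fun a b => key b ≤ key a) →
      (∀ k : Int, ys.filter (fun a => key a == k) = zs.filter (fun a => key a == k)) →
      ys = zs := by
  intro ys
  induction ys with
  | nil =>
    intro zs _ _ hf
    cases zs with
    | nil => rfl
    | cons z zs =>
      have := hf (key z)
      simp at this
  | cons y ys ih =>
    intro zs hy hz hf
    cases zs with
    | nil =>
      have := hf (key y)
      simp at this
    | cons z zs =>
      rw [List.pairwise_cons] at hy hz
      have hkey : key y = key z := by
        by_cases hyz : key y = key z
        · exact hyz
        · exfalso
          have h1 := hf (key z)
          have h2 := hf (key y)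
          have hz_mem : ∃ a ∈ y :: ys, key a = key z := by
            have : z ∈ (y :: ys).filter (fun a => key a == (key z)) := by
              rw [h1]; simp
            rcases List.mem_filter.1 this with ⟨hm, hb⟩
            exact ⟨z, hm, rfl⟩
          have hy_mem : ∃ a ∈ z :: zs, key a = key y := by
            have : y ∈ (z :: zs).filter (fun a => key a == (key y)) := by
              rw [← h2]; simp
            rcases List.mem_filter.1 this with ⟨hm, hb⟩
            exact ⟨y, hm, rfl⟩
          rcases hz_mem with ⟨a, ha, hka⟩
          rcases hy_mem with ⟨b, hb, hkb⟩
          have h3 : key z ≤ key y := by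
            rcases List.mem_cons.1 ha with ha | ha
            · subst ha; omega
            · have := hy.1 a ha; omega
          have h4 : key y ≤ key z := by
            rcases List.mem_cons.1 hb with hb | hb
            · subst hb; omega
            · have := hz.1 b hb; omega
          omega
      have hheads := hf (key y)
      rw [List.filter_cons, List.filter_cons, if_pos (by simp),
          if_pos (by simp [hkey])] at hheads
      have hyz : y = z := (List.cons.injEq _ _ _ _ ▸ hheads : _ ∧ _).1
      subst hyz
      congr 1
      refine ih zs hy.2 hz.2 (fun k => ?_)
      have h := hf k
      rw [List.filter_cons, List.filter_cons] at h
      by_cases hk : (key y == k) = true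
      · rw [if_pos hk, if_pos hk] at h
        exact (List.cons.injEq _ _ _ _ ▸ h : _ ∧ _).2
      · rw [if_neg hk, if_neg hk] at h
        exact h

theorem pv_foldl_insertBy_filter (key : String → Int) (k : Int) (xs : List String) :
    ∀ acc : List String, acc.Pairwise (fun a b => key b ≤ key a) →
      (xs.foldl (fun acc x => PySem.List.insertBy (fun a b => decide (key b < key a)) x acc) acc).filter
          (fun a => key a == k)
        = acc.filter (fun a => key a == k) ++ xs.filter (fun a => key a == k) := by
  induction xs with
  | nil => intro acc _; simp
  | cons x xs ih =>
    intro acc hacc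
    rw [List.foldl_cons, ih _ (pv_insertBy_pairwise key x acc hacc),
        pv_insertBy_filter key k x acc hacc, List.filter_cons]
    by_cases hx : (key x == k) = true <;> simp [hx]

theorem pv_sorted_rev_filter (key : String → Int) (k : Int) (xs : List String) :
    (PySem.List.sorted xs key true).filter (fun a => key a == k)
      = xs.filter (fun a => key a == k) := by
  rw [PySem.List.sorted_rev_eq_foldl_insertBy,
      pv_foldl_insertBy_filter key k xs [] (by simp)]
  simp

-- blocks of a strictly key-descending key list, flattened, are key-descending
theorem pv_flatMap_pairwise (key : String → Int) (lst : List String) (ks : List Int)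
    (hks : ks.Pairwise (fun a b => b < a)) :
    (ks.flatMap (fun c => lst.filter (fun s => key s == c))).Pairwise
      (fun a b => key b ≤ key a) := by
  induction ks with
  | nil => simp
  | cons c ks ih =>
    rw [List.pairwise_cons] at hks
    rw [List.flatMap_cons]
    refine List.pairwise_append.2 ⟨?_, ih hks.2, ?_⟩
    · refine List.pairwise_of_forall_mem_list ?_
      intro a ha b hb
      have h1 : key a = c := by
        rcases List.mem_filter.1 ha with ⟨_, h⟩; exact_mod_cast eq_of_beq h
      have h2 : key b = c := by
        rcases List.mem_filter.1 hb with ⟨_, h⟩; exact_mod_cast eq_of_beq h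
      omega
    · intro a ha b hb
      have hka : key a = c := by
        rcases List.mem_filter.1 ha with ⟨_, h⟩; exact_mod_cast eq_of_beq h
      rcases List.mem_flatMap.1 hb with ⟨c', hc', hbm⟩
      have hkb : key b = c' := by
        rcases List.mem_filter.1 hbm with ⟨_, h⟩; exact_mod_cast eq_of_beq h
      have := hks.1 c' hc'
      omega

-- per-key block filtered by another key
theorem pv_block_filter (key : String → Int) (lst : List String) (c k : Int) :
    (lst.filter (fun s => key s == c)).filter (fun s => key s == k)
      = if c = k then lst.filter (fun s => key s == c) else [] := by
  split
  · next h => subst h; simp [List.filter_filter]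
  · next h =>
    refine List.filter_eq_nil_iff.2 ?_
    intro s hs
    rcases List.mem_filter.1 hs with ⟨_, hc⟩
    have : key s = c := by exact_mod_cast eq_of_beq hc
    simp [this, h]

theorem pv_flatMap_filter_aux (key : String → Int) (lst : List String) (k : Int) :
    ∀ ks : List Int, ks.Nodup →
      (ks.flatMap (fun c => lst.filter (fun s => key s == c))).filter (fun s => key s == k)
        = if k ∈ ks then lst.filter (fun s => key s == k) else [] := by
  intro ks
  induction ks with
  | nil => simp
  | cons c ks ih =>
    intro hnd
    rw [List.nodup_cons] at hnd
    rw [List.flatMap_cons, List.filter_append, pv_block_filter, ih hnd.2]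
    by_cases hck : c = k
    · subst hck
      simp [hnd.1]
    · have hkc : ¬ k = c := fun h => hck h.symm
      rw [if_neg hck, List.nil_append]
      by_cases hk : k ∈ ks
      · rw [if_pos hk, if_pos (List.mem_cons.2 (Or.inr hk))]
      · rw [if_neg hk, if_neg (by simp [List.mem_cons, hkc, hk])]

theorem pv_flatMap_filter (key : String → Int) (lst : List String) (k : Int)
    (ks : List Int) (hnd : ks.Nodup) (hmem : ∀ s ∈ lst, key s ∈ ks) :
    (ks.flatMap (fun c => lst.filter (fun s => key s == c))).filter (fun s => key s == k)
      = lst.filter (fun s => key s == k) := by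
  rw [pv_flatMap_filter_aux key lst k ks hnd]
  by_cases hk : k ∈ ks
  · simp [hk]
  · rw [if_neg hk]
    refine (List.filter_eq_nil_iff.2 ?_).symm
    intro s hs hb
    have : key s = k := by exact_mod_cast eq_of_beq hb
    exact hk (this ▸ hmem s hs)

-- A's result is: distinct keys in descending order, each replaced by its block of inputs
theorem pv_A_eq (lst : List String) :
    sort_by_consonant_count lst
      = (PySem.List.sorted (PySem.Set.ofList (lst.map count_max_adj_consonants)) (fun x => x) true).flatMap
          (fun c => lst.filter (fun s => count_max_adj_consonants s == c)) := by
  simp only [sort_by_consonant_count]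
  have hfold : (fun (d : PySem.Dict Int (List String)) s =>
        if d.contains (count_max_adj_consonants s) = true then
          d.modify (count_max_adj_consonants s) [] (fun v => v ++ [s])
        else d.insert (count_max_adj_consonants s) [s])
      = (fun (d : PySem.Dict Int (List String)) s =>
          d.modify (count_max_adj_consonants s) [] (fun v => v ++ [s])) := by
    funext d s
    by_cases hc : d.contains (count_max_adj_consonants s) = true
    · simp [hc]
    · simp only [Bool.not_eq_true] at hc
      simp [hc, PySem.Dict.modify, PySem.Dict.getD_of_not_contains _ _ hc]
  rw [hfold]
  have hkeys : (lst.foldl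
      (fun (d : PySem.Dict Int (List String)) s =>
        d.modify (count_max_adj_consonants s) [] (fun v => v ++ [s]))
      PySem.Dict.empty).keys
      = PySem.Set.ofList (lst.map count_max_adj_consonants) := by
    have h := PySem.Dict.keys_foldl_modify_key lst count_max_adj_consonants
      ([] : List String) (fun _ s => fun v => v ++ [s]) PySem.Dict.empty
    simpa [PySem.Set.update_nil_left] using h
  rw [hkeys]
  have hgetD : ∀ c : Int, (lst.foldl
      (fun (d : PySem.Dict Int (List String)) s =>
        d.modify (count_max_adj_consonants s) [] (fun v => v ++ [s]))
      PySem.Dict.empty).getD c []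
      = lst.filter (fun s => count_max_adj_consonants s == c) := by
    intro c
    have hsplit : lst.foldl
        (fun (d : PySem.Dict Int (List String)) s =>
          d.modify (count_max_adj_consonants s) [] (fun v => v ++ [s]))
        PySem.Dict.empty
        = (lst.map (fun s => (count_max_adj_consonants s, s))).foldl
            (fun d p => d.modify p.1 [] (fun v => v ++ [p.2])) PySem.Dict.empty := by
      rw [List.foldl_map]
    rw [hsplit, PySem.Dict.getD_foldl_modify_append]
    simp [List.filter_map, List.map_map, Function.comp_def]
  rw [PySem.List.foldl_append_eq_flatMap]
  simp only [List.nil_append]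
  rw [funext hgetD]

-- ===== VERDICT (by name: the statement is the Claim_ definition above) =====
theorem sort_by_consonant_count_spec : Claim_equal_sort_by_consonant_count := by
  intro lst _
  unfold Spec_sort_by_consonant_count sort_by_consonant_count_alt
  rw [funext pv_key_eq]
  have hperm : (PySem.List.sorted
      (PySem.Set.ofList (lst.map count_max_adj_consonants)) (fun x => x) true).Perm
      (PySem.Set.ofList (lst.map count_max_adj_consonants)) :=
    PySem.List.sorted_perm _ _ _
  have hnd : (PySem.List.sorted
      (PySem.Set.ofList (lst.map count_max_adj_consonants)) (fun x => x) true).Nodup :=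
    hperm.nodup_iff.2 (PySem.Set.nodup_ofList _)
  have hdesc := PySem.List.sorted_pairwise_rev
    (PySem.Set.ofList (lst.map count_max_adj_consonants)) (fun x => x)
  have hlt : (PySem.List.sorted
      (PySem.Set.ofList (lst.map count_max_adj_consonants)) (fun x => x) true).Pairwise
      (fun a b => b < a) :=
    (hdesc.and hnd).imp (fun h => lt_of_le_of_ne h.1 (Ne.symm h.2))
  have hmem : ∀ s ∈ lst, count_max_adj_consonants s ∈ PySem.List.sorted
      (PySem.Set.ofList (lst.map count_max_adj_consonants)) (fun x => x) true := by
    intro s hs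
    rw [PySem.List.mem_sorted]
    exact (PySem.Set.mem_ofList _ _).2 (List.mem_map_of_mem hs)
  refine pv_eq_of_filters count_max_adj_consonants _ _ ?_ ?_ ?_
  · rw [pv_A_eq]
    exact pv_flatMap_pairwise count_max_adj_consonants lst _ hlt
  · exact PySem.List.sorted_pairwise_rev lst count_max_adj_consonants
  · intro k
    rw [pv_A_eq, pv_flatMap_filter count_max_adj_consonants lst k _ hnd hmem,
        pv_sorted_rev_filter count_max_adj_consonants k lst]
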